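-- pv_equiv track=rewrite | github.com/glsch/solemne-data-atelier | src/solemne_data_atelier/vector_store.py | _build_unique_ids
-- ===== SOURCE A (Python) =====
-- from typing import Any, Dict, Iterable, List, Optional, Sequence, Tuple
--
-- def _build_unique_ids(references: Sequence[str]) -> List[str]:
--     seen: Dict[str, int] = {}
--     out: List[str] = []
--     for i, ref in enumerate(references):
--         base = str(ref).strip() or f"row_{i}"
--         count = seen.get(base, 0)
--         seen[base] = count + 1
--         out.append(base if count == 0 else f"{base}__{count}")
--     return out
-- ===== SOURCE B (Python) =====
-- from typing import Dict, List, Sequence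
--
-- def _build_unique_ids(references: Sequence[str]) -> List[str]:
--     bases = [str(ref).strip() or f"row_{i}" for i, ref in enumerate(references)]
--     groups: Dict[str, List[int]] = {}
--     for i, b in enumerate(bases):
--         groups.setdefault(b, []).append(i)
--     out = [""] * len(bases)
--     for b, idxs in groups.items():
--         for j, i in enumerate(idxs):
--             out[i] = b if j == 0 else f"{b}__{j}"
--     return out
-- ===== Notes on version B (the rewrite author's own statement) =====
-- stated objective: alternative
-- what changed: Replaced the single running-counter pass by a group-and-scatter scheme: first index every base's occurrence positions in a dict of lists, then for each group write base / base__j into a pre-sized output at the original positions.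
import Mathlib
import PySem

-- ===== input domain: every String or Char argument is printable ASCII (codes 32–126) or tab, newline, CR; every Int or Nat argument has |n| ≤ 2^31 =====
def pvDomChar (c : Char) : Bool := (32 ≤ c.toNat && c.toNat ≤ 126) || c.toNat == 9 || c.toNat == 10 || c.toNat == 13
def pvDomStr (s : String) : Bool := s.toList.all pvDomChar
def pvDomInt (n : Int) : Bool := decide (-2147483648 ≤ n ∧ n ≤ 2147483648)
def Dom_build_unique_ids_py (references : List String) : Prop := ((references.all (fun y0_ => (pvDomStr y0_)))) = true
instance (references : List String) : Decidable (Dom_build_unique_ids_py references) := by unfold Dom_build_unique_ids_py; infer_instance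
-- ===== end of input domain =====

-- B replaces A's single running-counter pass by group-and-scatter: a first pass groups
-- each base's occurrence positions in a dict of index lists, a second pass writes
-- base / base__j for the j-th occurrence into a pre-sized output (alternative, not faster).


-- ===== PORT A =====
-- base = str(ref).strip() or f"row_{i}"   (shared by both ports: both Pythons compute it verbatim)
def pvBase (p : Int × String) : String :=
  let s := PySem.Str.strip p.2
  if s = "" then "row_" ++ PySem.Int.toStr p.1 else s

def build_unique_ids_py (references : List String) : List String :=
  ((PySem.List.enumerate references 0).foldl
    (fun (st : PySem.Dict String Int × List String) p =>
      let base := pvBase p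
      let count := st.1.getD base 0
      (st.1.insert base (count + 1),
       st.2 ++ [if count = 0 then base else base ++ "__" ++ PySem.Int.toStr count]))
    (PySem.Dict.empty, [])).2

-- ===== PORT B =====
def build_unique_ids_py_alt (references : List String) : List String :=
  let bases := (PySem.List.enumerate references 0).map pvBase
  -- groups.setdefault(b, []).append(i)  ≡  groups[b] = groups.get(b, []) + [i]  = Dict.modify
  let groups := (PySem.List.enumerate bases 0).foldl
    (fun (d : PySem.Dict String (List Int)) p => d.modify p.2 [] (· ++ [p.1]))
    PySem.Dict.empty
  -- out = [""] * n; for b, idxs in groups.items(): for j, i in enumerate(idxs): out[i] = …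
  groups.items.foldl
    (fun out p =>
      (PySem.List.enumerate p.2 0).foldl
        (fun out q =>
          PySem.List.pySetD out q.2 (if q.1 = 0 then p.1 else p.1 ++ "__" ++ PySem.Int.toStr q.1))
        out)
    (List.replicate bases.length "")

-- ===== PRECONDITION & SPEC =====
def Spec_build_unique_ids_py (references : List String) (out : List String) : Prop := out = build_unique_ids_py_alt references
instance (references : List String) (out : List String) : Decidable (Spec_build_unique_ids_py references out) := by unfold Spec_build_unique_ids_py; infer_instance

-- ===== CLAIM (what is proved, stated in full; the proofs are below) =====
def Claim_equal_build_unique_ids_py : Prop := ∀ (references : List String), Dom_build_unique_ids_py references → Spec_build_unique_ids_py references (build_unique_ids_py references)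

-- ===== LEMMAS AND PROOFS =====

-- the intended id list for bases bs, given that the bases pre already occurred before them
def pvSuffixed (pre bs : List String) : List String :=
  match bs with
  | [] => []
  | b :: bs =>
    (if pre.count b = 0 then b else b ++ "__" ++ PySem.Int.toStr (pre.count b : Int))
      :: pvSuffixed (pre ++ [b]) bs

-- A's fold, with seen counting exactly the bases in pre, produces pvSuffixed
theorem pvFoldA (l : List (Int × String)) (pre : List String)
    (seen : PySem.Dict String Int) (acc : List String)
    (hseen : ∀ b, seen.getD b 0 = (pre.count b : Int)) :
    (l.foldl
      (fun (st : PySem.Dict String Int × List String) p =>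
        let base := pvBase p
        let count := st.1.getD base 0
        (st.1.insert base (count + 1),
         st.2 ++ [if count = 0 then base else base ++ "__" ++ PySem.Int.toStr count]))
      (seen, acc)).2 = acc ++ pvSuffixed pre (l.map pvBase) := by
  induction l generalizing pre seen acc with
  | nil => simp [pvSuffixed]
  | cons p l ih =>
    simp only [List.foldl_cons, List.map_cons, pvSuffixed]
    rw [ih (pre ++ [pvBase p]) _ _ ?_]
    · rw [hseen]
      by_cases h : pre.count (pvBase p) = 0 <;>
        simp [h, List.append_assoc]
    · intro b
      rw [PySem.Dict.getD_insert]
      by_cases hb : b = pvBase p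
      · subst hb
        rw [if_pos rfl, hseen]
        have hcnt : List.count (pvBase p) (pre ++ [pvBase p]) = List.count (pvBase p) pre + 1 := by
          simp
        rw [hcnt]; push_cast; ring
      · rw [if_neg hb, hseen]
        have hcnt : List.count b (pre ++ [pvBase p]) = List.count b pre := by
          simp [List.count_append, Ne.symm hb]
        rw [hcnt]

theorem pvSuffixed_length (bs : List String) : ∀ pre, (pvSuffixed pre bs).length = bs.length := by
  induction bs with
  | nil => intro pre; rfl
  | cons b bs ih => intro pre; simp [pvSuffixed, ih]

theorem pvSuffixed_getElem? (bs : List String) : ∀ (pre : List String) (k : Nat)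
    (hk : k < bs.length),
    (pvSuffixed pre bs)[k]? =
      some (if (pre ++ bs.take k).count bs[k] = 0 then bs[k]
            else bs[k] ++ "__" ++ PySem.Int.toStr (((pre ++ bs.take k).count bs[k] : Nat) : Int)) := by
  induction bs with
  | nil => intro pre k hk; simp at hk
  | cons b bs ih =>
    intro pre k hk
    cases k with
    | zero => simp [pvSuffixed]
    | succ k =>
      have hk' : k < bs.length := by simpa using hk
      simp only [pvSuffixed, List.getElem?_cons_succ, List.getElem_cons_succ,
        List.take_succ_cons]
      rw [ih (pre ++ [b]) k hk']
      simp [List.append_assoc]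

-- positions (enumerate indices) at which b occurs among bs enumerated from s
def pvPos (s : Int) (bs : List String) (b : String) : List Int :=
  ((PySem.List.enumerate bs s).filter (fun p => p.2 == b)).map (·.1)

theorem pvPos_cons_self (s : Int) (x : String) (bs : List String) :
    pvPos s (x :: bs) x = s :: pvPos (s + 1) bs x := by
  simp [pvPos, PySem.List.enumerate_cons]

theorem pvPos_cons_ne (s : Int) (x b : String) (bs : List String) (hx : x ≠ b) :
    pvPos s (x :: bs) b = pvPos (s + 1) bs b := by
  simp [pvPos, PySem.List.enumerate_cons, hx]

theorem pvPos_spec (bs : List String) : ∀ (s : Int) (b : String) (j : Nat)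
    (_hj : j < (pvPos s bs b).length),
    ∃ k : Nat, (pvPos s bs b)[j]? = some (s + k) ∧ k < bs.length ∧ bs[k]? = some b ∧
      (bs.take k).count b = j := by
  induction bs with
  | nil => intro s b j hj; simp [pvPos, PySem.List.enumerate_nil] at hj
  | cons x bs ih =>
    intro s b j hj
    by_cases hx : x = b
    · subst hx
      rw [pvPos_cons_self] at hj ⊢
      cases j with
      | zero => exact ⟨0, by simp, by simp, by simp, by simp⟩
      | succ j =>
        have hj' : j < (pvPos (s + 1) bs x).length := by simpa using hj
        obtain ⟨k, h1, h2, h3, h4⟩ := ih (s + 1) x j hj'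
        refine ⟨k + 1, ?_, by simp only [List.length_cons]; omega, by simpa using h3, ?_⟩
        · rw [List.getElem?_cons_succ, h1]; congr 1; push_cast; ring
        · simp [List.take_succ_cons, List.count_cons_self, h4]
    · rw [pvPos_cons_ne s x b bs hx] at hj ⊢
      obtain ⟨k, h1, h2, h3, h4⟩ := ih (s + 1) b j hj
      refine ⟨k + 1, ?_, by simp only [List.length_cons]; omega, by simpa using h3, ?_⟩
      · have hcast : s + 1 + (k : Int) = s + ((k + 1 : Nat) : Int) := by push_cast; ring
        rw [h1, hcast]
      · simp [List.take_succ_cons, List.count_cons_of_ne (by exact hx) , h4]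

theorem pvPos_mem (bs : List String) (k : Nat) (hk : k < bs.length) :
    ((k : Int)) ∈ pvPos 0 bs bs[k] := by
  simp only [pvPos, List.mem_map, List.mem_filter]
  refine ⟨((k : Int), bs[k]), ⟨?_, by simp⟩, rfl⟩
  rw [PySem.List.mem_enumerate_iff]
  exact ⟨k, hk, by simp⟩

-- folding in-range writes whose values agree with target
theorem pvScatter (target : List String) : ∀ (L : List (Int × String)) (out : List String),
    out.length = target.length →
    (∀ q ∈ L, 0 ≤ q.1 ∧ q.1.toNat < target.length ∧ target[q.1.toNat]? = some q.2) →
    (L.foldl (fun o q => PySem.List.pySetD o q.1 q.2) out).length = target.length ∧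
    (∀ k : Nat, (∃ q ∈ L, q.1 = (k : Int)) →
      (L.foldl (fun o q => PySem.List.pySetD o q.1 q.2) out)[k]? = target[k]?) ∧
    (∀ k : Nat, (∀ q ∈ L, q.1 ≠ (k : Int)) →
      (L.foldl (fun o q => PySem.List.pySetD o q.1 q.2) out)[k]? = out[k]?) := by
  intro L
  induction L with
  | nil => intro out hlen _; exact ⟨hlen, by simp, by simp⟩
  | cons q L ih =>
    intro out hlen hq
    obtain ⟨hq0, hqlt, hqv⟩ := hq q (by simp)
    have hset : PySem.List.pySetD out q.1 q.2 = out.set q.1.toNat q.2 :=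
      PySem.List.pySetD_of_nonneg out q.2 hq0
    have hlen' : (out.set q.1.toNat q.2).length = target.length := by simp [hlen]
    obtain ⟨ihlen, ihcov, ihold⟩ := ih (out.set q.1.toNat q.2) hlen'
      (fun r hr => hq r (List.mem_cons_of_mem _ hr))
    refine ⟨by simpa [hset] using ihlen, ?_, ?_⟩
    · intro k hk
      simp only [List.foldl_cons, hset]
      by_cases hL : ∃ r ∈ L, r.1 = (k : Int)
      · exact ihcov k hL
      · have hL' : ∀ r ∈ L, r.1 ≠ (k : Int) := fun r hr h => hL ⟨r, hr, h⟩
        obtain ⟨r, hr, hrk⟩ := hk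
        rcases List.mem_cons.1 hr with rfl | hrL
        · have hkq : r.1.toNat = k := by omega
          rw [ihold k hL', List.getElem?_set]
          rw [if_pos hkq, if_pos (by omega : r.1.toNat < out.length)]
          rw [← hqv, hkq]
        · exact absurd hrk (hL' r hrL)
    · intro k hk
      simp only [List.foldl_cons, hset]
      rw [ihold k (fun r hr => hk r (List.mem_cons_of_mem _ hr)), List.getElem?_set]
      have : q.1.toNat ≠ k := by
        have := hk q (by simp)
        omega
      rw [if_neg this]

-- the group-and-scatter body of B, over the bases list, computes pvSuffixed [] bases
theorem pvAuxB (bases : List String) :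
    (((PySem.List.enumerate bases 0).foldl
        (fun (d : PySem.Dict String (List Int)) p => d.modify p.2 [] (· ++ [p.1]))
        PySem.Dict.empty).items.foldl
      (fun out p =>
        (PySem.List.enumerate p.2 0).foldl
          (fun out q =>
            PySem.List.pySetD out q.2 (if q.1 = 0 then p.1 else p.1 ++ "__" ++ PySem.Int.toStr q.1))
          out)
      (List.replicate bases.length "")) = pvSuffixed [] bases := by
  set target := pvSuffixed [] bases with htarget
  have htlen : target.length = bases.length := pvSuffixed_length bases []
  set groups := (PySem.List.enumerate bases 0).foldl
    (fun (d : PySem.Dict String (List Int)) p => d.modify p.2 [] (· ++ [p.1]))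
    PySem.Dict.empty with hgroups
  have hkeys : groups.keys = PySem.Set.ofList bases := by
    have h := PySem.Dict.keys_foldl_modify_key (PySem.List.enumerate bases 0) Prod.snd []
      (fun _ (p : Int × String) => (· ++ [p.1])) PySem.Dict.empty
    simpa [PySem.Set.update_nil_left, PySem.List.map_snd_enumerate, PySem.Dict.keys_empty,
      hgroups] using h
  have hnodup : groups.keys.Nodup := by
    have h := PySem.Dict.nodup_keys_foldl_modify_key (PySem.List.enumerate bases 0) Prod.snd []
      (fun _ (p : Int × String) => (· ++ [p.1])) PySem.Dict.empty
      (by simp [PySem.Dict.keys_empty])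
    simpa [hgroups] using h
  have hgetD : ∀ b, groups.getD b [] = pvPos 0 bases b := by
    intro b
    have hswap : groups = ((PySem.List.enumerate bases 0).map Prod.swap).foldl
        (fun (d : PySem.Dict String (List Int)) r => d.modify r.1 [] (· ++ [r.2]))
        PySem.Dict.empty := by
      rw [List.foldl_map]; rfl
    rw [hswap, PySem.Dict.getD_foldl_modify_append]
    simp only [PySem.Dict.getD_empty, List.nil_append, List.filter_map, List.map_map, pvPos]
    rfl
  have hitems : groups.items = (PySem.Set.ofList bases).map (fun b => (b, pvPos 0 bases b)) := by
    rw [PySem.Dict.items_eq_map_keys groups hnodup [], hkeys]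
    exact List.map_congr_left (fun b _ => by rw [hgetD b])
  rw [hitems, List.foldl_map]
  have hfun : (fun (out : List String) (b : String) =>
      (PySem.List.enumerate (b, pvPos 0 bases b).2 0).foldl
        (fun out q => PySem.List.pySetD out q.2
          (if q.1 = 0 then (b, pvPos 0 bases b).1
           else (b, pvPos 0 bases b).1 ++ "__" ++ PySem.Int.toStr q.1)) out)
    = (fun (out : List String) (b : String) =>
        (((PySem.List.enumerate (pvPos 0 bases b) 0).map
            (fun q => (q.2, if q.1 = 0 then b else b ++ "__" ++ PySem.Int.toStr q.1))).foldl
          (fun o r => PySem.List.pySetD o r.1 r.2) out)) := by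
    funext out b
    rw [List.foldl_map]
  rw [show (fun (x : List String) (y : String) =>
        (fun (out : List String) (p : String × List Int) =>
          (PySem.List.enumerate p.2 0).foldl
            (fun out q => PySem.List.pySetD out q.2
              (if q.1 = 0 then p.1 else p.1 ++ "__" ++ PySem.Int.toStr q.1)) out)
          x ((fun b => (b, pvPos 0 bases b)) y)) =
      (fun (out : List String) (b : String) =>
        (((PySem.List.enumerate (pvPos 0 bases b) 0).map
            (fun q => (q.2, if q.1 = 0 then b else b ++ "__" ++ PySem.Int.toStr q.1))).foldl
          (fun o r => PySem.List.pySetD o r.1 r.2) out)) from by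
    funext out b
    simp only []
    rw [List.foldl_map]]
  rw [← List.foldl_flatMap]
  set L := (PySem.Set.ofList bases).flatMap
    (fun b => (PySem.List.enumerate (pvPos 0 bases b) 0).map
      (fun q => (q.2, if q.1 = 0 then b else b ++ "__" ++ PySem.Int.toStr q.1))) with hL
  have hwrites : ∀ q ∈ L, 0 ≤ q.1 ∧ q.1.toNat < target.length ∧ target[q.1.toNat]? = some q.2 := by
    intro r hr
    rw [hL, List.mem_flatMap] at hr
    obtain ⟨b, _, hrb⟩ := hr
    rw [List.mem_map] at hrb
    obtain ⟨q, hq, rfl⟩ := hrb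
    rw [PySem.List.mem_enumerate_iff] at hq
    obtain ⟨m, hm, rfl⟩ := hq
    obtain ⟨k, h1, h2, h3, h4⟩ := pvPos_spec bases 0 b m hm
    rw [List.getElem?_eq_getElem hm] at h1
    have hpm : (pvPos 0 bases b)[m] = (k : Int) := by simpa using h1
    have hb : bases[k] = b := by
      rw [List.getElem?_eq_getElem h2] at h3; simpa using h3
    refine ⟨by simp [hpm], ?_, ?_⟩
    · simp [hpm, htlen, h2]
    · have htn : ((0 : Int) + (m : Int), (pvPos 0 bases b)[m]).2.toNat = k := by simp [hpm]
      rw [htn, htarget, pvSuffixed_getElem? bases [] k h2]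
      simp only [List.nil_append, hb, h4]
      congr 1
      by_cases hm0 : m = 0
      · subst hm0; simp
      · rw [if_neg (by exact_mod_cast hm0),
          if_neg (by simp; omega)]
        simp
  obtain ⟨hRlen, hRcov, _⟩ := pvScatter target L (List.replicate bases.length "")
    (by simp [htlen]) hwrites
  apply List.ext_getElem?
  intro i
  by_cases hi : i < target.length
  · apply hRcov
    have hin : i < bases.length := by omega
    have hib : bases[i] ∈ PySem.Set.ofList bases := by
      rw [PySem.Set.mem_ofList]
      exact List.getElem_mem hin
    obtain ⟨m, hm, hpm⟩ := List.mem_iff_getElem.1 (pvPos_mem bases i hin)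
    refine ⟨(((i : Int), if ((m : Int)) = 0 then bases[i]
        else bases[i] ++ "__" ++ PySem.Int.toStr ((m : Int)))), ?_, rfl⟩
    rw [hL, List.mem_flatMap]
    refine ⟨bases[i], hib, ?_⟩
    rw [List.mem_map]
    refine ⟨((m : Int), (i : Int)), ?_, by simp⟩
    rw [PySem.List.mem_enumerate_iff]
    exact ⟨m, hm, by simp [hpm]⟩
  · rw [List.getElem?_eq_none (by omega),
      List.getElem?_eq_none (by rw [htarget] at hi ⊢; omega)]

theorem build_unique_ids_py_eq_alt (references : List String) :
    build_unique_ids_py references = build_unique_ids_py_alt references := by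
  unfold build_unique_ids_py build_unique_ids_py_alt
  rw [pvFoldA _ [] _ _ (by intro b; simp [PySem.Dict.getD_empty])]
  rw [pvAuxB ((PySem.List.enumerate references 0).map pvBase)]
  simp

-- ===== VERDICT (by name: the statement is the Claim_ definition above) =====
theorem build_unique_ids_py_spec : Claim_equal_build_unique_ids_py := by
  intro references _
  exact build_unique_ids_py_eq_alt references
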